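-- pv_equiv track=rewrite | github.com/CANO-Lulaw/Year-2 | OOD/Py10.5.py | find_minimum_max_weigth
-- ===== SOURCE A (Python) =====
-- def pack(weights, k, max_weight):
--     sum_weight = 0
--     box_count = 1
--
--     for weight in weights:
--         if sum_weight + weight > max_weight:
--             box_count += 1
--             sum_weight = weight
--             if box_count > k:
--                 return False
--         else:
--             sum_weight += weight
--
--     return True
--
-- def find_minimum_max_weigth(weights, k):
--     low, hight = max(weights), sum(weights)
--
--     while low < hight:
--         mid = (low + hight) // 2
--         if pack(weights, k, mid):
--             hight = mid
--         else:
--             low = mid + 1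
--
--     return low
-- ===== SOURCE B (Python) =====
-- def find_minimum_max_weigth(weights, k):
--     # Prefix-sum DP (memoized recursion): best(g, i) = minimal achievable
--     # maximum group sum when the first i items are split into exactly g
--     # contiguous non-empty groups.  With g groups clamped to [1, n].
--     n = len(weights)
--     if k >= n:
--         return max(weights)   # one box per item (raises ValueError on empty, like A)
--     prefix = [0]
--     s = 0
--     for w in weights:
--         s += w
--         prefix.append(s)
--     memo = {}
--     def best(g, i):
--         if g == 1:
--             return prefix[i]
--         if (g, i) not in memo:
--             memo[(g, i)] = min(max(best(g - 1, p), prefix[i] - prefix[p])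
--                                for p in range(g - 1, i))
--         return memo[(g, i)]
--     return best(max(1, k), n)
-- ===== Notes on version B (the rewrite author's own statement) =====
-- stated objective: alternative
-- what changed: Replaces binary-search-on-the-answer with a greedy feasibility test by a prefix-sum dynamic program (memoized recursion) over (groups, prefix length), with a direct max(weights) answer when k >= n.
-- outside the precondition, e.g. on find_minimum_max_weigth([4, -4], 1): A returns 4, B returns 0; on find_minimum_max_weigth([], 3): A raises ValueError, B raises ValueError
import Mathlib
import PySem

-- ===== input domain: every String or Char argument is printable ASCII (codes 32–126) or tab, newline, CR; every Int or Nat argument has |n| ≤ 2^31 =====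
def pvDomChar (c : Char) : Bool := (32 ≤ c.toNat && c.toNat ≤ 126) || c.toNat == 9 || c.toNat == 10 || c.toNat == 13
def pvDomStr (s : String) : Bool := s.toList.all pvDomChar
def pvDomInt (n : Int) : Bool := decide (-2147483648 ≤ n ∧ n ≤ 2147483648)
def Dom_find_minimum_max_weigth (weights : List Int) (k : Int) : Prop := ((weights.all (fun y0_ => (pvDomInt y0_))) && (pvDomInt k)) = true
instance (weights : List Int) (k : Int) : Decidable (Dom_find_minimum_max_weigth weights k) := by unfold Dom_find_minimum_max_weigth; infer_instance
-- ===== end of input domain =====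

-- B replaces A's binary search on the answer by a prefix-sum DP over (groups, prefix length); equivalence is about the return value only.

-- ===== PORT A =====
-- greedy packing test: True iff the weights fit into at most k boxes of capacity max_weight (greedy left to right)
def packGo (k max_weight : Int) : List Int → Int → Int → Bool
  | [], _, _ => true
  | w :: ws, sum_weight, box_count =>
    if sum_weight + w > max_weight then
      if box_count + 1 > k then false
      else packGo k max_weight ws w (box_count + 1)
    else packGo k max_weight ws (sum_weight + w) box_count

def pack (weights : List Int) (k : Int) (max_weight : Int) : Bool :=
  packGo k max_weight weights 0 1

-- bounds of the probed midpoint, cited by the port's decreasing_by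
theorem pvMidBounds (low hight : Int) (h : low < hight) :
    low ≤ PySem.Int.floordiv (low + hight) 2 ∧ PySem.Int.floordiv (low + hight) 2 < hight := by
  rw [PySem.Int.floordiv_eq_ediv_of_pos (by norm_num)]
  omega

-- the 'while low < hight' loop of A
def bsGo (weights : List Int) (k : Int) (low hight : Int) : Int :=
  if h : low < hight then
    let mid := PySem.Int.floordiv (low + hight) 2
    if pack weights k mid then bsGo weights k low mid
    else bsGo weights k (mid + 1) hight
  else low
termination_by (hight - low).toNat
decreasing_by
  · have := pvMidBounds low hight h; omega
  · have := pvMidBounds low hight h; omega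

def find_minimum_max_weigth (weights : List Int) (k : Int) : Int :=
  -- low = max(weights) (ValueError on [] : excluded by Pre_), hight = sum(weights)
  let low := (PySem.List.max? weights (fun y => y)).getD 0
  let hight := weights.sum
  bsGo weights k low hight

-- ===== PORT B =====
-- prefix sums: the loop 's += w; prefix.append(s)' of Source B
def pvPrefixAux (s : Int) : List Int → List Int
  | [] => []
  | w :: ws => (s + w) :: pvPrefixAux (s + w) ws

-- python min() over a non-empty sequence ([] is unreachable in B)
def pvMinList : List Int → Int
  | [] => 0
  | x :: xs => xs.foldl min x

-- best(g, i) of Source B (the memo cache only avoids recomputation; values are identical)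
def bestRec (pfx : List Int) : Nat → Nat → Int
  | 0, _ => 0   -- unreachable: best is only called with g ≥ 1
  | 1, i => pfx.getD i 0
  | g + 2, i =>
    pvMinList ((List.range' (g + 1) (i - (g + 1))).map
      (fun p => max (bestRec pfx (g + 1) p) (pfx.getD i 0 - pfx.getD p 0)))

def find_minimum_max_weigth_alt (weights : List Int) (k : Int) : Int :=
  let n := weights.length
  if (n : Int) ≤ k then (PySem.List.max? weights (fun y => y)).getD 0
  else bestRec (0 :: pvPrefixAux 0 weights) (max 1 k).toNat n

-- ===== PRECONDITION & SPEC =====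
-- Pre_ excludes the empty list (A raises ValueError) and lists containing a negative weight when k < n:
-- box weights are naturally nonnegative, and on negative weights the greedy feasibility predicate is
-- non-monotone, so the value A's binary search lands on is an artefact of its probing order.
def Pre_find_minimum_max_weigth (weights : List Int) (k : Int) : Prop :=
  weights ≠ [] ∧ (weights.all (fun w => 0 ≤ w) = true ∨ (weights.length : Int) ≤ k)
instance (weights : List Int) (k : Int) : Decidable (Pre_find_minimum_max_weigth weights k) := by
  unfold Pre_find_minimum_max_weigth; infer_instance

def pvWitness_find_minimum_max_weigth : List Int × Int := ([2, 3, 4], 2)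

def Spec_find_minimum_max_weigth (weights : List Int) (k : Int) (out : Int) : Prop := out = find_minimum_max_weigth_alt weights k
instance (weights : List Int) (k : Int) (out : Int) : Decidable (Spec_find_minimum_max_weigth weights k out) := by unfold Spec_find_minimum_max_weigth; infer_instance

-- ===== CLAIM (what is proved, stated in full; the proofs are below) =====
def Claim_equal_find_minimum_max_weigth : Prop := ∀ (weights : List Int) (k : Int), Dom_find_minimum_max_weigth weights k → Pre_find_minimum_max_weigth weights k → Spec_find_minimum_max_weigth weights k (find_minimum_max_weigth weights k)

-- ===== LEMMAS AND PROOFS =====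

-- greedy box count (pack without the early exit; pack is 'count ≤ max k box_count')
def countGo (X : Int) : List Int → Int → Int → Int
  | [], _, b => b
  | w :: ws, s, b => if s + w > X then countGo X ws w (b + 1) else countGo X ws (s + w) b

-- sum of the first i weights
def pvP (ws : List Int) (i : Nat) : Int := (ws.take i).sum

-- 'the first i items split into exactly g contiguous groups, last group non-empty, every group sum ≤ X'
def Feas (ws : List Int) : Nat → Nat → Int → Prop
  | 0, _, _ => False
  | 1, i, X => pvP ws i ≤ X
  | g + 2, i, X => ∃ p : Nat, g + 1 ≤ p ∧ p < i ∧ Feas ws (g + 1) p X ∧ pvP ws i - pvP ws p ≤ X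

theorem count_ge (X : Int) : ∀ (l : List Int) (s b : Int), b ≤ countGo X l s b := by
  intro l
  induction l with
  | nil => intro s b; simp [countGo]
  | cons w ws ih =>
    intro s b
    simp only [countGo]
    split
    · exact le_trans (by omega) (ih w (b + 1))
    · exact ih (s + w) b

theorem count_le_len (X : Int) : ∀ (l : List Int) (s b : Int), countGo X l s b ≤ b + l.length := by
  intro l
  induction l with
  | nil => intro s b; simp [countGo]
  | cons w ws ih =>
    intro s b
    simp only [countGo, List.length_cons]
    split
    · have := ih w (b + 1); push_cast; omega
    · have := ih (s + w) b; push_cast; omega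

theorem pack_eq_count (k X : Int) :
    ∀ (l : List Int) (s b : Int), packGo k X l s b = decide (countGo X l s b ≤ max k b) := by
  intro l
  induction l with
  | nil =>
    intro s b
    simp [packGo, countGo, le_max_iff]
  | cons w ws ih =>
    intro s b
    simp only [packGo, countGo]
    split
    · split
      · rename_i h1 h2
        have hge := count_ge X ws w (b + 1)
        have : ¬ countGo X ws w (b + 1) ≤ max k b := by
          simp only [le_max_iff]; push_neg; omega
        simp [this]
      · rename_i h1 h2
        rw [ih w (b + 1)]
        congr 1
        have : max k (b + 1) = max k b := by omega
        rw [this]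
    · exact ih (s + w) b

theorem noSplit (X : Int) :
    ∀ (l r : List Int) (s b : Int), (∀ w ∈ l, 0 ≤ w) → s + l.sum ≤ X →
      countGo X (l ++ r) s b = countGo X r (s + l.sum) b := by
  intro l
  induction l with
  | nil => intro r s b _ _; simp [countGo]
  | cons w ws ih =>
    intro r s b hnn hsum
    have hw : 0 ≤ w := hnn w (by simp)
    have hrest : ∀ x ∈ ws, 0 ≤ x := fun x hx => hnn x (by simp [hx])
    have hsum' : 0 ≤ ws.sum := List.sum_nonneg hrest
    simp only [List.cons_append, countGo, List.sum_cons]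
    have hnotsplit : ¬ s + w > X := by
      simp only [List.sum_cons] at hsum; omega
    simp only [if_neg hnotsplit]
    have := ih r (s + w) b hrest (by simp only [List.sum_cons] at hsum; omega)
    rw [this]; ring_nf

theorem groupPass (X : Int) :
    ∀ (q r : List Int) (s b : Int), (∀ w ∈ q, 0 ≤ w) → 0 ≤ s → q.sum ≤ X →
      ∃ s' b', countGo X (q ++ r) s b = countGo X r s' b' ∧ 0 ≤ s' ∧ b' ≤ b + 1 := by
  intro q
  induction q with
  | nil => intro r s b _ hs _; exact ⟨s, b, by simp [countGo], hs, by omega⟩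
  | cons w q' ih =>
    intro r s b hnn hs hsum
    have hw : 0 ≤ w := hnn w (by simp)
    have hrest : ∀ x ∈ q', 0 ≤ x := fun x hx => hnn x (by simp [hx])
    have hsq' : 0 ≤ q'.sum := List.sum_nonneg hrest
    simp only [List.cons_append, countGo]
    by_cases hsp : s + w > X
    · simp only [if_pos hsp]
      have hns : w + q'.sum ≤ X := by simp only [List.sum_cons] at hsum; omega
      rw [noSplit X q' r w (b + 1) hrest hns]
      exact ⟨w + q'.sum, b + 1, rfl, by omega, by omega⟩
    · simp only [if_neg hsp]
      obtain ⟨s', b', heq, hs', hb'⟩ := ih r (s + w) b hrest (by omega)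
        (by simp only [List.sum_cons] at hsum; omega)
      exact ⟨s', b', heq, hs', hb'⟩

theorem count_flatten_le (X : Int) :
    ∀ (parts : List (List Int)) (s b : Int),
      (∀ q ∈ parts, (∀ w ∈ q, 0 ≤ w) ∧ q.sum ≤ X) → 0 ≤ s →
      countGo X parts.flatten s b ≤ b + parts.length := by
  intro parts
  induction parts with
  | nil => intro s b _ _; simp [countGo, count_le_len]
  | cons q rest ih =>
    intro s b hok hs
    simp only [List.flatten_cons, List.length_cons]
    obtain ⟨s', b', heq, hs', hb'⟩ :=
      groupPass X q rest.flatten s b (hok q (by simp)).1 hs (hok q (by simp)).2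
    rw [heq]
    have := ih s' b' (fun q hq => hok q (by simp [hq])) hs'
    push_cast
    omega

theorem count_le_of_splits (ws : List Int) (X : Int) (parts : List (List Int))
    (hne : parts ≠ []) (hfl : parts.flatten = ws)
    (hnn : ∀ w ∈ ws, 0 ≤ w) (hsum : ∀ q ∈ parts, q.sum ≤ X) :
    countGo X ws 0 1 ≤ parts.length := by
  match parts, hne with
  | q :: rest, _ =>
    have hq : q.sum ≤ X := hsum q (by simp)
    have hqnn : ∀ w ∈ q, 0 ≤ w := fun w hw => hnn w (by rw [← hfl]; simp [hw])
    have hrnn : ∀ p ∈ rest, (∀ w ∈ p, 0 ≤ w) ∧ p.sum ≤ X := by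
      intro p hp
      refine ⟨fun w hw => hnn w ?_, hsum p (by simp [hp])⟩
      rw [← hfl]
      simp only [List.flatten_cons, List.mem_append]
      exact Or.inr (List.mem_flatten.2 ⟨p, hp, hw⟩)
    have h0 : (0 : Int) + q.sum ≤ X := by omega
    calc countGo X ws 0 1 = countGo X (q ++ rest.flatten) 0 1 := by
            rw [← hfl]; simp
      _ = countGo X rest.flatten (0 + q.sum) 1 := noSplit X q rest.flatten 0 1 hqnn h0
      _ ≤ 1 + rest.length := count_flatten_le X rest (0 + q.sum) 1 hrnn
            (by have := List.sum_nonneg hqnn; omega)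
      _ = (q :: rest).length := by simp [List.length_cons]; omega

-- greedy run extraction: the greedy boxes themselves form a valid split
theorem greedy_extract (X : Int) :
    ∀ (l : List Int) (s b : Int), 0 ≤ s → s ≤ X → (∀ w ∈ l, 0 ≤ w ∧ w ≤ X) →
      ∃ h t, (h :: t : List (List Int)).flatten = l ∧
        ((h :: t).length : Int) + b = countGo X l s b + 1 ∧
        s + h.sum ≤ X ∧ (∀ q ∈ t, q.sum ≤ X ∧ q ≠ []) := by
  intro l
  induction l with
  | nil =>
    intro s b hs hsX _
    exact ⟨[], [], by simp, by simp only [countGo, List.length_cons, List.length_nil]; omega,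
      by simpa using hsX, by simp⟩
  | cons w l' ih =>
    intro s b hs hsX hb
    have hw := hb w (by simp)
    have hb' : ∀ x ∈ l', 0 ≤ x ∧ x ≤ X := fun x hx => hb x (by simp [hx])
    by_cases hsp : s + w > X
    · obtain ⟨h, t, hfl, hlen, hhead, htail⟩ := ih w (b + 1) hw.1 hw.2 hb'
      refine ⟨[], (w :: h) :: t, by simp [← hfl], ?_, by simpa using hsX, ?_⟩
      · simp only [countGo, if_pos hsp]
        simp only [List.length_cons] at hlen ⊢
        push_cast at hlen ⊢
        omega
      · intro q hq
        simp only [List.mem_cons] at hq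
        rcases hq with rfl | hq
        · exact ⟨by simpa using hhead, by simp⟩
        · exact htail q hq
    · obtain ⟨h, t, hfl, hlen, hhead, htail⟩ := ih (s + w) b (by omega) (by omega) hb'
      refine ⟨w :: h, t, by simp [← hfl], ?_, ?_, htail⟩
      · simp only [countGo, if_neg hsp]
        simpa using hlen
      · simp only [List.sum_cons]
        omega

theorem splits_of_count (ws : List Int) (X : Int) (hne : ws ≠ [])
    (hb : ∀ w ∈ ws, 0 ≤ w ∧ w ≤ X) :
    ∃ parts : List (List Int), (parts.length : Int) = countGo X ws 0 1 ∧
      parts.flatten = ws ∧ ∀ q ∈ parts, q ≠ [] ∧ q.sum ≤ X := by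
  match ws, hne with
  | w :: l, _ =>
    have hw := hb w (by simp)
    have hb' : ∀ x ∈ l, 0 ≤ x ∧ x ≤ X := fun x hx => hb x (by simp [hx])
    have hsp : ¬ (0 : Int) + w > X := by omega
    obtain ⟨h, t, hfl, hlen, hhead, htail⟩ := greedy_extract X l w 1 hw.1 hw.2 hb'
    refine ⟨(w :: h) :: t, ?_, by simp [← hfl], ?_⟩
    · simp only [countGo, if_neg hsp, zero_add]
      simp only [List.length_cons] at hlen ⊢
      push_cast at hlen ⊢
      omega
    · intro q hq
      simp only [List.mem_cons] at hq
      rcases hq with rfl | hq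
      · exact ⟨by simp, by simpa using hhead⟩
      · exact ⟨(htail q hq).2, (htail q hq).1⟩

theorem pvP_mono (ws : List Int) (hnn : ∀ w ∈ ws, 0 ≤ w) {i j : Nat} (h : i ≤ j) :
    pvP ws i ≤ pvP ws j := by
  unfold pvP
  have h1 : List.take i ws = List.take i (List.take j ws) := by
    rw [List.take_take, min_eq_left h]
  have h2 : 0 ≤ ((ws.take j).drop i).sum :=
    List.sum_nonneg fun w hw => hnn w (List.mem_of_mem_take (List.mem_of_mem_drop hw))
  calc (ws.take i).sum ≤ (List.take i (ws.take j)).sum + ((ws.take j).drop i).sum := by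
        rw [← h1]; omega
    _ = (ws.take j).sum := by rw [← List.sum_append, List.take_append_drop]

theorem pvP_nonneg (ws : List Int) (hnn : ∀ w ∈ ws, 0 ≤ w) (i : Nat) : 0 ≤ pvP ws i := by
  unfold pvP
  exact List.sum_nonneg fun w hw => hnn w (List.mem_of_mem_take hw)

theorem len_le_flatten (parts : List (List Int)) (h : ∀ q ∈ parts, q ≠ []) :
    parts.length ≤ parts.flatten.length := by
  induction parts with
  | nil => simp
  | cons q rest ih =>
    simp only [List.flatten_cons, List.length_cons, List.length_append]
    have hq : q ≠ [] := h q (by simp)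
    have : 1 ≤ q.length := by
      cases q with
      | nil => exact absurd rfl hq
      | cons _ _ => simp
    have := ih fun p hp => h p (by simp [hp])
    omega

theorem feas_of_parts (ws : List Int) (X : Int) :
    ∀ (g : Nat) (parts : List (List Int)) (i : Nat), parts.length = g → 1 ≤ g →
      parts.flatten = ws.take i → i ≤ ws.length →
      (∀ q ∈ parts, q ≠ [] ∧ q.sum ≤ X) → Feas ws g i X := by
  intro g
  induction g using Nat.strong_induction_on with
  | _ g ihg =>
    intro parts i hlen hg hfl hile hprops
    match g, hg with
    | 1, _ =>
      match parts, hlen with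
      | [q], _ =>
        simp only [List.flatten_cons, List.flatten_nil, List.append_nil] at hfl
        simp only [Feas, pvP]
        rw [← hfl]
        exact (hprops q (by simp)).2
    | gg + 2, _ =>
      have hpne : parts ≠ [] := by intro hc; rw [hc] at hlen; simp at hlen
      have hsplit := (List.dropLast_append_getLast hpne).symm
      set init := parts.dropLast with hinit
      set q := parts.getLast hpne with hq
      have hlinit : init.length = gg + 1 := by
        rw [hinit, List.length_dropLast, hlen]
        omega
      have hfl2 : init.flatten ++ q = ws.take i := by
        rw [← hfl, hsplit]
        simp
      have htklen : (ws.take i).length = i := by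
        simp [List.length_take, hile]
      have hlensum : init.flatten.length + q.length = i := by
        have := congrArg List.length hfl2
        simpa [htklen] using this
      have hqmem : q ∈ parts := by rw [hsplit]; simp
      have hqne : q ≠ [] := (hprops q hqmem).1
      have hqlen : 1 ≤ q.length := by
        cases hq' : q with
        | nil => exact absurd hq' hqne
        | cons _ _ => simp
      set p := init.flatten.length with hp
      have hplt : p < i := by omega
      have hpge : gg + 1 ≤ p := by
        have := len_le_flatten init (fun r hr => (hprops r (by rw [hsplit]; simp [hr])).1)
        omega
      have hinitfl : init.flatten = ws.take p := by
        have h1 : init.flatten = (ws.take i).take p := by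
          rw [← hfl2, hp, List.take_left]
        rw [h1, List.take_take, min_eq_left (by omega)]
      have hfeas : Feas ws (gg + 1) p X :=
        ihg (gg + 1) (by omega) init p hlinit (by omega) hinitfl (by omega)
          (fun r hr => hprops r (by rw [hsplit]; simp [hr]))
      have hqsum : pvP ws i - pvP ws p = q.sum := by
        have := congrArg List.sum hfl2
        simp only [List.sum_append] at this
        rw [hinitfl] at this
        simp only [pvP]
        omega
      refine ⟨p, hpge, hplt, hfeas, ?_⟩
      rw [hqsum]
      exact (hprops q hqmem).2

theorem splits_of_feas (ws : List Int) (X : Int) :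
    ∀ (g i : Nat), Feas ws g i X →
      ∃ parts : List (List Int), parts.length = g ∧ parts.flatten = ws.take i ∧
        ∀ q ∈ parts, q.sum ≤ X := by
  intro g
  induction g using Nat.strong_induction_on with
  | _ g ihg =>
    intro i hfeas
    match g with
    | 0 => exact hfeas.elim
    | 1 =>
      refine ⟨[ws.take i], by simp, by simp, ?_⟩
      intro q hq
      simp only [List.mem_cons, List.not_mem_nil, or_false] at hq
      rw [hq]
      exact hfeas
    | gg + 2 =>
      obtain ⟨p, hpge, hplt, hfp, hlast⟩ := hfeas
      obtain ⟨parts, hlen, hfl, hsums⟩ := ihg (gg + 1) (by omega) p hfp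
      refine ⟨parts ++ [(ws.take i).drop p], by simp [hlen], ?_, ?_⟩
      · rw [List.flatten_append, hfl]
        simp only [List.flatten_cons, List.flatten_nil, List.append_nil]
        have h1 : ws.take p = (ws.take i).take p := by
          rw [List.take_take, min_eq_left (by omega)]
        rw [h1, List.take_append_drop]
      · intro q hq
        rcases List.mem_append.1 hq with h | h
        · exact hsums q h
        · simp only [List.mem_cons, List.not_mem_nil, or_false] at h
          rw [h]
          have h1 : ws.take p = (ws.take i).take p := by
            rw [List.take_take, min_eq_left (by omega)]
          have h2 := congrArg List.sum (List.take_append_drop p (ws.take i))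
          simp only [List.sum_append] at h2
          rw [← h1] at h2
          simp only [pvP] at hlast
          omega

theorem feas_mono_g (ws : List Int) (X : Int) (hnn : ∀ w ∈ ws, 0 ≤ w) :
    ∀ (g i : Nat), g + 2 ≤ i → Feas ws (g + 1) i X → Feas ws (g + 2) i X := by
  intro g
  induction g using Nat.strong_induction_on with
  | _ g ihg =>
    intro i hgi hf
    match g with
    | 0 =>
      simp only [Feas] at hf ⊢
      refine ⟨1, le_refl 1, by omega, ?_, ?_⟩
      · have := pvP_mono ws hnn (show 1 ≤ i by omega)
        omega
      · have := pvP_nonneg ws hnn 1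
        omega
    | gg + 1 =>
      obtain ⟨p, hpge, hplt, hfp, hlast⟩ := hf
      by_cases hp2 : gg + 2 ≤ p
      · refine ⟨p, hp2, hplt, ihg gg (by omega) p hp2 hfp, hlast⟩
      · have hpeq : p = gg + 1 := by omega
        refine ⟨i - 1, by omega, by omega, ?_, ?_⟩
        · refine ⟨p, hpge, by omega, hfp, ?_⟩
          have := pvP_mono ws hnn (show i - 1 ≤ i by omega)
          omega
        · have h1 := pvP_mono ws hnn (show p ≤ i - 1 by omega)
          omega

theorem feas_mono_upto (ws : List Int) (X : Int) (hnn : ∀ w ∈ ws, 0 ≤ w)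
    (g g' i : Nat) (h1 : 1 ≤ g) (hgg : g ≤ g') (hgi : g' ≤ i) (hf : Feas ws g i X) :
    Feas ws g' i X := by
  revert hgi
  induction g' , hgg using Nat.le_induction with
  | base => intro _; exact hf
  | succ g'' hg'' ihp =>
    intro hgi
    have hprev : Feas ws g'' i X := ihp (by omega)
    have h1 : 1 ≤ g'' := by omega
    match g'' , h1, hprev, hgi with
    | m + 1, _, hprev, hgi =>
      exact feas_mono_g ws X hnn m i (by omega) hprev

theorem elem_le_of_feas (ws : List Int) (X : Int) (hnn : ∀ w ∈ ws, 0 ≤ w) :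
    ∀ (g i : Nat), Feas ws g i X → ∀ j, j < i → pvP ws (j + 1) - pvP ws j ≤ X := by
  intro g
  induction g using Nat.strong_induction_on with
  | _ g ihg =>
    intro i hfeas j hj
    match g with
    | 0 => exact hfeas.elim
    | 1 =>
      simp only [Feas] at hfeas
      have h1 := pvP_mono ws hnn (show j + 1 ≤ i by omega)
      have h2 := pvP_nonneg ws hnn j
      omega
    | gg + 2 =>
      obtain ⟨p, hpge, hplt, hfp, hlast⟩ := hfeas
      by_cases hjp : j < p
      · exact ihg (gg + 1) (by omega) p hfp j hjp
      · have h1 := pvP_mono ws hnn (show j + 1 ≤ i by omega)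
        have h2 := pvP_mono ws hnn (show p ≤ j by omega)
        omega

theorem foldl_min_le_init : ∀ (xs : List Int) (x : Int), xs.foldl min x ≤ x := by
  intro xs
  induction xs with
  | nil => intro x; simp
  | cons a t ih =>
    intro x
    simp only [List.foldl_cons]
    exact le_trans (ih (min x a)) (min_le_left x a)

theorem foldl_min_mem : ∀ (xs : List Int) (x : Int), xs.foldl min x = x ∨ xs.foldl min x ∈ xs := by
  intro xs
  induction xs with
  | nil => intro x; simp
  | cons a t ih =>
    intro x
    simp only [List.foldl_cons, List.mem_cons]
    rcases ih (min x a) with h | h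
    · rcases min_cases x a with ⟨he, _⟩ | ⟨he, _⟩
      · left; rw [h, he]
      · right; left; rw [h, he]
    · right; right; exact h

theorem pvMinList_le (l : List Int) (y : Int) (hy : y ∈ l) : pvMinList l ≤ y := by
  match l, hy with
  | x :: xs, hy =>
    simp only [pvMinList]
    rcases List.mem_cons.1 hy with rfl | hmem
    · exact foldl_min_le_init xs y
    · clear hy
      induction xs generalizing x with
      | nil => cases hmem
      | cons a t ih =>
        simp only [List.foldl_cons]
        rcases List.mem_cons.1 hmem with rfl | h
        · exact le_trans (foldl_min_le_init t (min x y)) (min_le_right x y)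
        · exact ih (min x a) h

theorem pvMinList_mem (l : List Int) (h : l ≠ []) : pvMinList l ∈ l := by
  match l, h with
  | x :: xs, _ =>
    simp only [pvMinList]
    rcases foldl_min_mem xs x with h | h
    · rw [h]; simp
    · simp [h]

theorem prefixAux_getD : ∀ (l : List Int) (s : Int) (j : Nat), j < l.length →
    (pvPrefixAux s l).getD j 0 = s + (l.take (j + 1)).sum := by
  intro l
  induction l with
  | nil => intro s j h; simp at h
  | cons w t ih =>
    intro s j h
    cases j with
    | zero => simp [pvPrefixAux]
    | succ j =>
      simp only [pvPrefixAux, List.getD_cons_succ, List.take_succ_cons, List.sum_cons]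
      rw [ih (s + w) j (by simpa using h)]
      ring

theorem pfx_getD (ws : List Int) :
    ∀ j, j ≤ ws.length → (0 :: pvPrefixAux 0 ws).getD j 0 = pvP ws j := by
  intro j hj
  cases j with
  | zero => simp [pvP]
  | succ j =>
    simp only [List.getD_cons_succ]
    rw [prefixAux_getD ws 0 j (by omega)]
    simp [pvP]

theorem bestRec_le_iff (ws : List Int) (X : Int) :
    ∀ (g i : Nat), 1 ≤ g → g ≤ i → i ≤ ws.length →
      (bestRec (0 :: pvPrefixAux 0 ws) g i ≤ X ↔ Feas ws g i X) := by
  intro g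
  induction g using Nat.strong_induction_on with
  | _ g ihg =>
    intro i hg hgi hin
    match g, hg with
    | 1, _ =>
      simp only [bestRec, Feas]
      rw [pfx_getD ws i hin]
    | gg + 2, _ =>
      simp only [bestRec, Feas]
      have hrne : ((List.range' (gg + 1) (i - (gg + 1))).map
          (fun p => max (bestRec (0 :: pvPrefixAux 0 ws) (gg + 1) p)
            ((0 :: pvPrefixAux 0 ws).getD i 0 - (0 :: pvPrefixAux 0 ws).getD p 0))) ≠ [] := by
        simp only [ne_eq, List.map_eq_nil_iff]
        intro hc
        have := congrArg List.length hc
        simp only [List.length_range', List.length_nil] at this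
        omega
      constructor
      · intro hle
        obtain ⟨p, hpr, hfp⟩ := List.mem_map.1 (pvMinList_mem _ hrne)
        have hpb := List.mem_range'_1.1 hpr
        have hp2 : p < i := by omega
        have hple : p ≤ ws.length := by omega
        have hmax : max (bestRec (0 :: pvPrefixAux 0 ws) (gg + 1) p)
            ((0 :: pvPrefixAux 0 ws).getD i 0 - (0 :: pvPrefixAux 0 ws).getD p 0) ≤ X := by
          rw [hfp]; exact hle
        refine ⟨p, by omega, hp2, ?_, ?_⟩
        · exact (ihg (gg + 1) (by omega) p (by omega) (by omega) hple).1
            (le_trans (le_max_left _ _) hmax)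
        · rw [← pfx_getD ws i hin, ← pfx_getD ws p hple]
          exact le_trans (le_max_right _ _) hmax
      · rintro ⟨p, hp1, hp2, hfeas, hlast⟩
        have hple : p ≤ ws.length := by omega
        have hmem : p ∈ List.range' (gg + 1) (i - (gg + 1)) :=
          List.mem_range'_1.2 ⟨hp1, by omega⟩
        have hfX : max (bestRec (0 :: pvPrefixAux 0 ws) (gg + 1) p)
            ((0 :: pvPrefixAux 0 ws).getD i 0 - (0 :: pvPrefixAux 0 ws).getD p 0) ≤ X := by
          apply max_le
          · exact (ihg (gg + 1) (by omega) p (by omega) (by omega) hple).2 hfeas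
          · rw [pfx_getD ws i hin, pfx_getD ws p hple]
            exact hlast
        exact le_trans (pvMinList_le _ _ (List.mem_map.2 ⟨p, hmem, rfl⟩)) hfX

theorem count_mono (X Y : Int) (hXY : X ≤ Y) :
    ∀ (l : List Int) (s₁ s₂ b₁ b₂ : Int), (∀ w ∈ l, 0 ≤ w) → 0 ≤ s₁ → 0 ≤ s₂ →
      (b₁ < b₂ ∨ (b₁ = b₂ ∧ s₁ ≤ s₂)) →
      countGo Y l s₁ b₁ ≤ countGo X l s₂ b₂ := by
  intro l
  induction l with
  | nil =>
    intro s₁ s₂ b₁ b₂ _ _ _ hrel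
    simp only [countGo]
    rcases hrel with h | ⟨h, _⟩ <;> omega
  | cons w t ih =>
    intro s₁ s₂ b₁ b₂ hnn hs₁ hs₂ hrel
    have hw : 0 ≤ w := hnn w (by simp)
    have ht : ∀ x ∈ t, 0 ≤ x := fun x hx => hnn x (by simp [hx])
    simp only [countGo]
    by_cases h1 : s₁ + w > Y
    · rw [if_pos h1]
      by_cases h2 : s₂ + w > X
      · rw [if_pos h2]
        refine ih w w (b₁ + 1) (b₂ + 1) ht hw hw ?_
        rcases hrel with h | ⟨h, h'⟩
        · left; omega
        · right; exact ⟨by omega, le_refl w⟩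
      · rw [if_neg h2]
        have hblt : b₁ < b₂ := by
          rcases hrel with h | ⟨h, h'⟩
          · exact h
          · exfalso; omega
        refine ih w (s₂ + w) (b₁ + 1) b₂ ht hw (by omega) ?_
        rcases lt_or_eq_of_le (by omega : b₁ + 1 ≤ b₂) with h | h
        · left; exact h
        · right; exact ⟨h, by omega⟩
    · rw [if_neg h1]
      by_cases h2 : s₂ + w > X
      · rw [if_pos h2]
        refine ih (s₁ + w) w b₁ (b₂ + 1) ht (by omega) hw ?_
        left
        rcases hrel with h | ⟨h, _⟩ <;> omega
      · rw [if_neg h2]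
        refine ih (s₁ + w) (s₂ + w) b₁ b₂ ht (by omega) (by omega) ?_
        rcases hrel with h | ⟨h, h'⟩
        · left; exact h
        · right; exact ⟨h, by omega⟩

theorem pack_mono (ws : List Int) (k : Int) (hnn : ∀ w ∈ ws, 0 ≤ w)
    {X Y : Int} (hXY : X ≤ Y) (hX : pack ws k X = true) : pack ws k Y = true := by
  unfold pack at *
  rw [pack_eq_count] at *
  simp only [decide_eq_true_eq] at *
  calc countGo Y ws 0 1 ≤ countGo X ws 0 1 :=
        count_mono X Y hXY ws 0 0 1 1 hnn le_rfl le_rfl (Or.inr ⟨rfl, le_rfl⟩)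
    _ ≤ max k 1 := hX

theorem bsGo_eq (ws : List Int) (k : Int)
    (mono : ∀ X Y : Int, X ≤ Y → pack ws k X = true → pack ws k Y = true) :
    ∀ (N : Nat) (lo hi L : Int), (hi - lo).toNat ≤ N → lo ≤ hi →
      lo ≤ L → L ≤ hi → pack ws k L = true →
      (∀ X, lo ≤ X → X < L → pack ws k X = false) →
      bsGo ws k lo hi = L := by
  intro N
  induction N with
  | zero =>
    intro lo hi L h0 hlohi hloL hLhi _ _
    rw [bsGo]
    have : ¬ lo < hi := by omega
    rw [dif_neg this]
    omega
  | succ N ih =>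
    intro lo hi L hN hlohi hloL hLhi hpL hfalse
    rw [bsGo]
    by_cases h : lo < hi
    · rw [dif_pos h]
      have hmid := pvMidBounds lo hi h
      set mid := PySem.Int.floordiv (lo + hi) 2 with hmiddef
      by_cases hp : pack ws k mid = true
      · rw [if_pos hp]
        have hLmid : L ≤ mid := by
          by_contra hc
          have := hfalse mid hmid.1 (by omega)
          rw [hp] at this
          cases this
        exact ih lo mid L (by omega) (by omega) hloL hLmid hpL hfalse
      · rw [if_neg hp]
        have hmidL : mid + 1 ≤ L := by
          by_contra hc
          exact hp (mono L mid (by omega) hpL)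
        exact ih (mid + 1) hi L (by omega) (by omega) hmidL hLhi hpL
          (fun X hX hXL => hfalse X (by omega) hXL)
    · rw [dif_neg h]
      omega

theorem bsGo_alltrue (ws : List Int) (k : Int) :
    ∀ (N : Nat) (lo hi : Int), (hi - lo).toNat ≤ N →
      (∀ X, lo ≤ X → pack ws k X = true) → bsGo ws k lo hi = lo := by
  intro N
  induction N with
  | zero =>
    intro lo hi h0 _
    rw [bsGo]
    rw [dif_neg (by omega)]
  | succ N ih =>
    intro lo hi hN hall
    rw [bsGo]
    by_cases h : lo < hi
    · rw [dif_pos h]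
      have hmid := pvMidBounds lo hi h
      rw [if_pos (hall _ hmid.1)]
      exact ih lo _ (by omega) hall
    · rw [dif_neg h]

-- ===== VERDICT (by name: the statement is the Claim_ definition above) =====
theorem find_minimum_max_weigth_spec : Claim_equal_find_minimum_max_weigth := by
  unfold Claim_equal_find_minimum_max_weigth
  intro ws k _ hpre
  unfold Spec_find_minimum_max_weigth
  obtain ⟨hne, hcase⟩ := hpre
  obtain ⟨m, hm⟩ : ∃ m, PySem.List.max? ws (fun y => y) = some m := by
    cases h : PySem.List.max? ws (fun y => y) with
    | none => exact absurd ((PySem.List.max?_eq_none_iff ws (fun y => y)).1 h) hne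
    | some m => exact ⟨m, rfl⟩
  have hmmem : m ∈ ws := PySem.List.max?_mem hm
  have hmmax : ∀ y ∈ ws, y ≤ m := by
    intro y hy
    simpa using PySem.List.max?_isMax hm y hy
  have hlpos : 0 < ws.length := List.length_pos_iff.2 hne
  simp only [find_minimum_max_weigth, find_minimum_max_weigth_alt, hm, Option.getD_some]
  by_cases hk : ((ws.length : Int)) ≤ k
  · rw [if_pos hk]
    apply bsGo_alltrue ws k ((ws.sum - m).toNat) m ws.sum le_rfl
    intro X hX
    obtain ⟨w, l, rfl⟩ : ∃ w l, ws = w :: l := by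
      cases ws with
      | nil => exact absurd rfl hne
      | cons a b => exact ⟨a, b, rfl⟩
    have hw : w ≤ m := hmmax w (by simp)
    unfold pack
    rw [pack_eq_count]
    simp only [decide_eq_true_eq]
    have h1 : ¬ ((0 : Int) + w > X) := by omega
    simp only [countGo, if_neg h1, zero_add]
    have h2 := count_le_len X l w 1
    simp only [List.length_cons] at hk
    push_cast at hk ⊢
    omega
  · rw [if_neg hk]
    have hnn : ∀ x ∈ ws, 0 ≤ x := by
      rcases hcase with h | h
      · intro x hx
        simpa using (List.all_eq_true.1 h) x hx
      · exact absurd h hk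
    have hk'c : (((max 1 k).toNat : Int)) = max 1 k := Int.toNat_of_nonneg (by omega)
    have hk1 : 1 ≤ (max 1 k).toNat := by omega
    have hk'n : (max 1 k).toNat ≤ ws.length := by
      have h1 : (((max 1 k).toNat : Int)) ≤ ((ws.length : Int)) := by
        rw [hk'c]; omega
      exact_mod_cast h1
    have hfeasV : Feas ws (max 1 k).toNat ws.length
        (bestRec (0 :: pvPrefixAux 0 ws) (max 1 k).toNat ws.length) :=
      (bestRec_le_iff ws _ (max 1 k).toNat ws.length hk1 hk'n le_rfl).1 le_rfl
    obtain ⟨j, hj, hje⟩ := List.mem_iff_getElem.1 hmmem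
    have hPsucc : pvP ws (j + 1) = pvP ws j + m := by
      simp only [pvP, List.take_succ]
      rw [List.getElem?_eq_getElem hj]
      simp [hje]
    have hmV : m ≤ bestRec (0 :: pvPrefixAux 0 ws) (max 1 k).toNat ws.length := by
      have := elem_le_of_feas ws _ hnn (max 1 k).toNat ws.length hfeasV j hj
      omega
    have hPn : pvP ws ws.length = ws.sum := by simp [pvP]
    have hbase : Feas ws 1 ws.length ws.sum := by
      simp only [Feas]
      rw [hPn]
    have hVS : bestRec (0 :: pvPrefixAux 0 ws) (max 1 k).toNat ws.length ≤ ws.sum :=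
      (bestRec_le_iff ws ws.sum (max 1 k).toNat ws.length hk1 hk'n le_rfl).2
        (feas_mono_upto ws ws.sum hnn 1 (max 1 k).toNat ws.length le_rfl hk1 hk'n hbase)
    have hmS : m ≤ ws.sum := by
      have h1 := pvP_mono ws hnn (show j + 1 ≤ ws.length by omega)
      have h2 := pvP_nonneg ws hnn j
      omega
    have hpackV : pack ws k (bestRec (0 :: pvPrefixAux 0 ws) (max 1 k).toNat ws.length) = true := by
      unfold pack
      rw [pack_eq_count]
      simp only [decide_eq_true_eq]
      obtain ⟨parts, hplen, hpfl, hpsums⟩ := splits_of_feas ws _ (max 1 k).toNat ws.length hfeasV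
      rw [List.take_length] at hpfl
      have hpne : parts ≠ [] := by
        intro hc
        rw [hc] at hplen
        simp at hplen
        omega
      have := count_le_of_splits ws _ parts hpne hpfl hnn hpsums
      rw [hplen] at this
      omega
    have hfalse : ∀ X, m ≤ X → X < bestRec (0 :: pvPrefixAux 0 ws) (max 1 k).toNat ws.length →
        pack ws k X = false := by
      intro X hX hXV
      cases h : pack ws k X with
      | false => rfl
      | true =>
        exfalso
        unfold pack at h
        rw [pack_eq_count] at h
        simp only [decide_eq_true_eq] at h
        obtain ⟨parts, hplen, hpfl, hprops⟩ :=
          splits_of_count ws X hne (fun w hw => ⟨hnn w hw, le_trans (hmmax w hw) hX⟩)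
        have hc1 := count_ge X ws 0 1
        have hplen1 : 1 ≤ parts.length := by omega
        have hfeasX : Feas ws parts.length ws.length X :=
          feas_of_parts ws X parts.length parts ws.length rfl hplen1
            (by rw [List.take_length]; exact hpfl) le_rfl hprops
        have hplk : parts.length ≤ (max 1 k).toNat := by omega
        have hfeasX' : Feas ws (max 1 k).toNat ws.length X :=
          feas_mono_upto ws X hnn parts.length (max 1 k).toNat ws.length hplen1 hplk hk'n hfeasX
        have := (bestRec_le_iff ws X (max 1 k).toNat ws.length hk1 hk'n le_rfl).2 hfeasX'
        omega
    exact bsGo_eq ws k (fun X Y hXY hXt => pack_mono ws k hnn hXY hXt)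
      ((ws.sum - m).toNat) m ws.sum _ le_rfl hmS hmV hVS hpackV hfalse
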